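-- pv_equiv track=rewrite | github.com/ayaka14732/wakong | src/wakong/generate_mask_scheme.py | distribute_insert_poses
-- ===== SOURCE A (Python) =====
-- MaskScheme = list[tuple[int, int]]
--
-- def distribute_insert_poses(abs_insert_poses: list[int], spans: list[int]) -> MaskScheme:
--     offset = 0
--     mask_scheme = []
--     for abs_insert_pos, span in zip(abs_insert_poses, spans):
--         insert_pos = abs_insert_pos + offset
--         mask_scheme.append((insert_pos, span))
--         offset += span + 1
--     return mask_scheme
-- ===== SOURCE B (Python) =====
-- def distribute_insert_poses(abs_insert_poses, spans):
--     # Phase 1: precompute the running offset *before* each index.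
--     off = 0
--     offsets = [0]
--     for span in spans:
--         off += span + 1
--         offsets.append(off)
--     # Phase 2: a single mapping pass over the three zipped sequences
--     # (zip truncates to the shortest, dropping offsets' trailing element).
--     return [(p + o, s) for p, s, o in zip(abs_insert_poses, spans, offsets)]
-- ===== Notes on version B (the rewrite author's own statement) =====
-- stated objective: alternative
-- what changed: Replaces the single offset-threading loop with two phases: an explicitly materialised cumulative-offset table, then a stateless mapping pass over the zipped inputs.
import Mathlib
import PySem

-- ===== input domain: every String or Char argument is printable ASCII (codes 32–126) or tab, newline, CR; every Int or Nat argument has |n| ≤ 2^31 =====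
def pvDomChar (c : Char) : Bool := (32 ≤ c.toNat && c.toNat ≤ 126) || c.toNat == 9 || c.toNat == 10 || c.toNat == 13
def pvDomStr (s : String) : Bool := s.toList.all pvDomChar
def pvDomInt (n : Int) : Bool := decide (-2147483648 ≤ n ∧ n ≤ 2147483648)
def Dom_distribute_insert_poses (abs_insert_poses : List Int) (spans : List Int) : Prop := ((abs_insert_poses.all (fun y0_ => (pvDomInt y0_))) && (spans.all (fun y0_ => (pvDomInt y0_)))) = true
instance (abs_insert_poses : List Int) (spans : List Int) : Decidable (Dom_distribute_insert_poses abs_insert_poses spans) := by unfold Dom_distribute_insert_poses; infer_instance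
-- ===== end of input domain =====

-- B replaces A's offset-threading loop by a precomputed cumulative-offset table plus a stateless mapping pass (alternative decomposition, same cost).


-- ===== PORT A =====
-- A's loop: threads the offset and appends to mask_scheme.
def pvLoopA : List (Int × Int) → Int → List (Int × Int) → List (Int × Int)
  | [], _, acc => acc
  | (p, s) :: rest, offset, acc => pvLoopA rest (offset + s + 1) (acc ++ [(p + offset, s)])

def distribute_insert_poses (abs_insert_poses : List Int) (spans : List Int) : List (Int × Int) :=
  pvLoopA (abs_insert_poses.zip spans) 0 []

-- ===== PORT B =====
-- B phase 1: the offsets list after the initial 0 (Source B's for-loop appending the running sum).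
def pvOffsets (off : Int) : List Int → List Int
  | [] => []
  | span :: rest => (off + span + 1) :: pvOffsets (off + span + 1) rest

def distribute_insert_poses_alt (abs_insert_poses : List Int) (spans : List Int) : List (Int × Int) :=
  let offsets : List Int := 0 :: pvOffsets 0 spans
  ((abs_insert_poses.zip spans).zip offsets).map (fun x => (x.1.1 + x.2, x.1.2))

-- ===== PRECONDITION & SPEC =====
def Spec_distribute_insert_poses (abs_insert_poses : List Int) (spans : List Int) (out : List (Int × Int)) : Prop := out = distribute_insert_poses_alt abs_insert_poses spans
instance (abs_insert_poses : List Int) (spans : List Int) (out : List (Int × Int)) : Decidable (Spec_distribute_insert_poses abs_insert_poses spans out) := by unfold Spec_distribute_insert_poses; infer_instance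

-- ===== CLAIM (what is proved, stated in full; the proofs are below) =====
def Claim_equal_distribute_insert_poses : Prop := ∀ (abs_insert_poses : List Int) (spans : List Int), Dom_distribute_insert_poses abs_insert_poses spans → Spec_distribute_insert_poses abs_insert_poses spans (distribute_insert_poses abs_insert_poses spans)

-- ===== LEMMAS AND PROOFS =====
theorem pvLoopA_eq (aps : List Int) : ∀ (spans : List Int) (offset : Int) (acc : List (Int × Int)),
    pvLoopA (aps.zip spans) offset acc
      = acc ++ ((aps.zip spans).zip (offset :: pvOffsets offset spans)).map
          (fun x => (x.1.1 + x.2, x.1.2)) := by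
  induction aps with
  | nil => intro spans offset acc; simp [pvLoopA]
  | cons p rest ih =>
    intro spans offset acc
    cases spans with
    | nil => simp [pvLoopA]
    | cons s spans' =>
      simp [pvLoopA, pvOffsets, ih spans' (offset + s + 1)]

-- ===== VERDICT (by name: the statement is the Claim_ definition above) =====
theorem distribute_insert_poses_spec : Claim_equal_distribute_insert_poses := by
  intro aps spans _
  unfold Spec_distribute_insert_poses distribute_insert_poses distribute_insert_poses_alt
  simpa using pvLoopA_eq aps spans 0 []
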